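-- pv_equiv track=rewrite | github.com/kissgyorgy/mdtools | mdtools/fix.py | convert_quote_to_code
-- ===== SOURCE A (Python) =====
-- def convert_quote_to_code(content):
--     fixed = []
--     in_block = False
--     changed = False
--     for line in content.splitlines():
--         if line.startswith("> "):
--             if not in_block:
--                 fixed.append("```")
--             in_block = True
--             changed = True
--             fixed.append(line[2:])
--         # exiting from the block
--         elif in_block:
--             fixed.append("```")
--             fixed.append(line)
--             in_block = False
--         else:
--             fixed.append(line)
--
--     replaced = "\n".join(fixed)
--     return replaced, changed
-- ===== SOURCE B (Python) =====
-- def convert_quote_to_code(content):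
--     # Run-based rewrite: split the lines into maximal runs of quote / non-quote
--     # lines and emit each run in one step, instead of a per-line state machine.
--     lines = content.splitlines()
--     fixed = []
--     changed = False
--     pending = False
--     i = 0
--     n = len(lines)
--     while i < n:
--         k = lines[i].startswith("> ")
--         j = i
--         while j < n and lines[j].startswith("> ") == k:
--             j += 1
--         group = lines[i:j]
--         if k:
--             changed = True
--             fixed.append("```")
--             fixed.extend(l[2:] for l in group)
--             pending = True
--         else:
--             if pending:
--                 fixed.append("```")
--             fixed.extend(group)
--             pending = False
--         i = j
--     return "\n".join(fixed), changed
-- ===== Notes on version B (the rewrite author's own statement) =====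
-- stated objective: alternative
-- what changed: Replaces the per-line in_block state machine by grouping the lines into maximal runs of quote/non-quote lines and emitting each run in one step (fence before a quote run, deferred close fence via a pending flag).
import Mathlib
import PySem

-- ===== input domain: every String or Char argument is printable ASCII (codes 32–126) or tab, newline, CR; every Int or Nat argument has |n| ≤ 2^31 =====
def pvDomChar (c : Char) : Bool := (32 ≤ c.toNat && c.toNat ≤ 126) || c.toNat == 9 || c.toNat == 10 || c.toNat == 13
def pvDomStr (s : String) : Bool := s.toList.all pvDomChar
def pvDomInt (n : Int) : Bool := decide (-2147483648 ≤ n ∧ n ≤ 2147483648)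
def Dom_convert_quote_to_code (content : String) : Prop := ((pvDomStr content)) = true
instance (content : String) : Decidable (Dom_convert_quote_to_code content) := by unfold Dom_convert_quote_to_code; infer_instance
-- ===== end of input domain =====

-- B rewrites A's per-line in_block state machine as a fold over maximal runs of quote / non-quote lines (alternative decomposition, same cost).

-- ===== PORT A =====
-- one iteration of A's for-loop over (fixed, in_block, changed)
def pvStepA (st : List String × Bool × Bool) (line : String) : List String × Bool × Bool :=
  let (fixed, in_block, changed) := st
  if PySem.Str.startswith line "> " then
    let fixed := if !in_block then fixed ++ ["```"] else fixed
    (fixed ++ [PySem.Str.slice line (some 2) none], true, true)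
  else if in_block then
    (fixed ++ ["```", line], false, changed)
  else
    (fixed ++ [line], in_block, changed)

def convert_quote_to_code (content : String) : String × Bool :=
  let r := (PySem.Str.splitlines content).foldl pvStepA ([], false, false)
  (PySem.Str.join "\n" r.1, r.2.2)

-- ===== PORT B =====
def pvIsQuote (l : String) : Bool := PySem.Str.startswith l "> "

-- inner while loop of B: longest prefix whose lines all have key k, plus the rest
def pvSpan (k : Bool) : List String → List String × List String
  | [] => ([], [])
  | l :: ls =>
    if pvIsQuote l == k then
      let p := pvSpan k ls
      (l :: p.1, p.2)
    else ([], l :: ls)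

theorem pvSpan_snd_length_le (k : Bool) : ∀ ls : List String, (pvSpan k ls).2.length ≤ ls.length := by
  intro ls
  induction ls with
  | nil => simp [pvSpan]
  | cons l ls ih =>
    simp only [pvSpan]
    split
    · exact Nat.le_succ_of_le ih
    · simp

-- outer while loop of B, phrased as the list of maximal (key, run) groups
def pvRuns : List String → List (Bool × List String)
  | [] => []
  | l :: ls =>
    (pvIsQuote l, l :: (pvSpan (pvIsQuote l) ls).1) :: pvRuns (pvSpan (pvIsQuote l) ls).2
termination_by ls => ls.length
decreasing_by
  simpa using Nat.lt_succ_of_le (pvSpan_snd_length_le _ ls)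

-- B's loop body for one run, over (fixed, pending, changed)
def pvStepB (st : List String × Bool × Bool) (r : Bool × List String) : List String × Bool × Bool :=
  let (fixed, pending, changed) := st
  if r.1 then
    (fixed ++ "```" :: r.2.map (fun l => PySem.Str.slice l (some 2) none), true, true)
  else
    ((if pending then fixed ++ ["```"] else fixed) ++ r.2, false, changed)

def convert_quote_to_code_alt (content : String) : String × Bool :=
  let r := (pvRuns (PySem.Str.splitlines content)).foldl pvStepB ([], false, false)
  (PySem.Str.join "\n" r.1, r.2.2)

-- ===== PRECONDITION & SPEC =====
def Spec_convert_quote_to_code (content : String) (out : String × Bool) : Prop := out = convert_quote_to_code_alt content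
instance (content : String) (out : String × Bool) : Decidable (Spec_convert_quote_to_code content out) := by unfold Spec_convert_quote_to_code; infer_instance

-- ===== CLAIM (what is proved, stated in full; the proofs are below) =====
def Claim_equal_convert_quote_to_code : Prop := ∀ (content : String), Dom_convert_quote_to_code content → Spec_convert_quote_to_code content (convert_quote_to_code content)

-- ===== LEMMAS AND PROOFS =====

theorem pvStepA_eq (fixed : List String) (inb c : Bool) (l : String) :
    pvStepA (fixed, inb, c) l =
      if pvIsQuote l then
        ((if !inb then fixed ++ ["```"] else fixed) ++ [PySem.Str.slice l (some 2) none], true, true)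
      else if inb then (fixed ++ ["```", l], false, c)
      else (fixed ++ [l], inb, c) := rfl

theorem pvStepB_eq (fixed : List String) (pending c : Bool) (k : Bool) (g : List String) :
    pvStepB (fixed, pending, c) (k, g) =
      if k then (fixed ++ "```" :: g.map (fun l => PySem.Str.slice l (some 2) none), true, true)
      else ((if pending then fixed ++ ["```"] else fixed) ++ g, false, c) := rfl

theorem pvSpan_mem_fst (k : Bool) : ∀ ls : List String, ∀ l ∈ (pvSpan k ls).1, pvIsQuote l = k := by
  intro ls
  induction ls with
  | nil => simp [pvSpan]
  | cons l ls ih =>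
    simp only [pvSpan]
    split
    · next h =>
      intro x hx
      rcases List.mem_cons.mp hx with rfl | hx
      · exact beq_iff_eq.mp h
      · exact ih x hx
    · simp

theorem pvSpan_append (k : Bool) : ∀ ls : List String, (pvSpan k ls).1 ++ (pvSpan k ls).2 = ls := by
  intro ls
  induction ls with
  | nil => simp [pvSpan]
  | cons l ls ih =>
    simp only [pvSpan]
    split
    · simpa using ih
    · simp

theorem pvSpan_head (k : Bool) : ∀ ls : List String, ∀ l, (pvSpan k ls).2.head? = some l → pvIsQuote l ≠ k := by
  intro ls
  induction ls with
  | nil => simp [pvSpan]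
  | cons l ls ih =>
    simp only [pvSpan]
    split
    · exact ih
    · next h =>
      intro x hx
      simp only [List.head?_cons, Option.some.injEq] at hx
      subst hx
      simpa using h

-- A's fold over the tail of a quote run (in_block and changed already true)
theorem foldA_quote : ∀ (g : List String) (fixed : List String),
    (∀ l ∈ g, pvIsQuote l = true) →
    g.foldl pvStepA (fixed, true, true)
      = (fixed ++ g.map (fun l => PySem.Str.slice l (some 2) none), true, true) := by
  intro g
  induction g with
  | nil => simp
  | cons l g ih =>
    intro fixed h
    have hl : pvIsQuote l = true := h l (by simp)
    rw [List.foldl_cons, pvStepA_eq, if_pos hl]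
    simp only [Bool.not_true, Bool.false_eq_true, if_false]
    rw [ih _ (fun x hx => h x (by simp [hx]))]
    simp

-- A's fold over a non-quote run with in_block already false
theorem foldA_plain : ∀ (g : List String) (fixed : List String) (c : Bool),
    (∀ l ∈ g, pvIsQuote l = false) →
    g.foldl pvStepA (fixed, false, c) = (fixed ++ g, false, c) := by
  intro g
  induction g with
  | nil => simp
  | cons l g ih =>
    intro fixed c h
    have hl : pvIsQuote l = false := h l (by simp)
    rw [List.foldl_cons, pvStepA_eq, if_neg (by simp [hl]), if_neg (by simp)]
    rw [ih _ _ (fun x hx => h x (by simp [hx]))]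
    simp

-- the core correspondence: A's per-line fold equals B's per-run fold,
-- provided in_block is only true when the next line is not a quote line
theorem main_lemma : ∀ (ls fixed : List String) (inb c : Bool),
    (inb = true → ∀ l, ls.head? = some l → pvIsQuote l = false) →
    ls.foldl pvStepA (fixed, inb, c) = (pvRuns ls).foldl pvStepB (fixed, inb, c) := by
  intro ls
  induction ls using pvRuns.induct with
  | case1 => intro fixed inb c _; simp [pvRuns]
  | case2 l ls ih =>
    intro fixed inb c hhead
    have hmem := pvSpan_mem_fst (pvIsQuote l) ls
    have happ := pvSpan_append (pvIsQuote l) ls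
    have hnext := pvSpan_head (pvIsQuote l) ls
    conv_lhs =>
      rw [show ls = (pvSpan (pvIsQuote l) ls).1 ++ (pvSpan (pvIsQuote l) ls).2 from happ.symm]
    simp only [pvRuns, List.foldl_cons, List.foldl_append]
    rw [pvStepA_eq, pvStepB_eq]
    cases hk : pvIsQuote l with
    | true =>
      -- quote run: in_block must be false here, A opens the fence on its first line
      have hinb : inb = false := by
        cases hinb2 : inb
        · rfl
        · exact absurd (hhead hinb2 l (by simp)) (by simp [hk])
      subst hinb
      rw [hk] at hmem hnext ih
      simp only [if_true, Bool.false_eq_true, if_false, Bool.not_false]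
      rw [foldA_quote _ _ hmem]
      rw [ih _ _ _ (fun _ x hx => by
        cases hq : pvIsQuote x
        · rfl
        · exact absurd hq (hnext x hx))]
      simp
    | false =>
      rw [hk] at hmem hnext ih
      simp only [Bool.false_eq_true, if_false]
      cases inb with
      | true =>
        simp only [if_true]
        rw [foldA_plain _ _ _ hmem, ih _ _ _ (fun h => by simp at h)]
        simp
      | false =>
        simp only [Bool.false_eq_true, if_false]
        rw [foldA_plain _ _ _ hmem, ih _ _ _ (fun h => by simp at h)]
        simp

-- ===== VERDICT (by name: the statement is the Claim_ definition above) =====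
theorem convert_quote_to_code_spec : Claim_equal_convert_quote_to_code := by
  intro content _
  unfold Spec_convert_quote_to_code convert_quote_to_code convert_quote_to_code_alt
  rw [main_lemma _ _ _ _ (fun h => by simp at h)]
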